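-- pv_equiv track=rewrite | github.com/MatteoBollecchino/Miscellaneous-Projects | ordinamento_lista_interessi.py | conteggio_elementi_categoria
-- ===== SOURCE A (Python) =====
-- def conteggio_elementi_categoria(list,categoria):
--     contatore = 0
--     numero_elementi = 0
--
--     for i in range(len(list)):
--         numero_elementi += 1
--         if(list[i] == "\n"):
--             contatore += 1
--             if(contatore == categoria):
--                 break
--             else:
--                 numero_elementi = 0
--
--     return numero_elementi
-- ===== SOURCE B (Python) =====
-- def conteggio_elementi_categoria(list, categoria):
--     # boundaries: -1 plus each newline position; segment length is a boundary difference
--     boundaries = [-1] + [i for i, x in enumerate(list) if x == "\n"]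
--     if 1 <= categoria <= len(boundaries) - 1:
--         return boundaries[categoria] - boundaries[categoria - 1]
--     return len(list) - boundaries[-1] - 1
-- ===== Notes on version B (the rewrite author's own statement) =====
-- stated objective: alternative
-- what changed: Replaced the early-break counting loop (running element counter reset at each newline) by building the table of newline boundary positions once and returning a closed-form difference of two boundaries (or the trailing-segment length).
import Mathlib
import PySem

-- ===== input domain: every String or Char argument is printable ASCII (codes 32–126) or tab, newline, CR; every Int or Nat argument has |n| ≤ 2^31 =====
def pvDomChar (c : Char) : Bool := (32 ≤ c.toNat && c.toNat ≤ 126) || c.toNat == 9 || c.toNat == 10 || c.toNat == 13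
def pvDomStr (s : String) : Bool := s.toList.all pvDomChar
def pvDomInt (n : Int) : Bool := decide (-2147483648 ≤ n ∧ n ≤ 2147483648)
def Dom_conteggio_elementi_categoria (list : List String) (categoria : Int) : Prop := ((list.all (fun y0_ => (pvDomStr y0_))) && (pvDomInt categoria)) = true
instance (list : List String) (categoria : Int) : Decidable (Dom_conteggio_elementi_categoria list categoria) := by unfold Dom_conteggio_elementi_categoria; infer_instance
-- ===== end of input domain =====

-- B replaces A's early-break counting loop by a one-pass newline-boundary table and a closed-form boundary difference (alternative decomposition, same asymptotic cost).
-- ===== PORT A =====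
def pvLoopA (categoria : Int) : List String → Int → Int → Int
  | [], _, ne => ne
  | x :: rest, c, ne =>
    if x == "\n" then
      if c + 1 == categoria then ne + 1
      else pvLoopA categoria rest (c + 1) 0
    else pvLoopA categoria rest c (ne + 1)

def conteggio_elementi_categoria (list : List String) (categoria : Int) : Int :=
  pvLoopA categoria list 0 0

-- ===== PORT B =====
def conteggio_elementi_categoria_alt (list : List String) (categoria : Int) : Int :=
  let boundaries : List Int :=
    -1 :: ((PySem.List.enumerate list).filterMap
      (fun p => if p.2 == "\n" then some p.1 else none))
  if 1 ≤ categoria ∧ categoria ≤ PySem.List.len boundaries - 1 then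
    PySem.List.pyGetD boundaries categoria 0 - PySem.List.pyGetD boundaries (categoria - 1) 0
  else
    PySem.List.len list - PySem.List.pyGetD boundaries (-1) 0 - 1

-- ===== PRECONDITION & SPEC =====
def Spec_conteggio_elementi_categoria (list : List String) (categoria : Int) (out : Int) : Prop := out = conteggio_elementi_categoria_alt list categoria
instance (list : List String) (categoria : Int) (out : Int) : Decidable (Spec_conteggio_elementi_categoria list categoria out) := by unfold Spec_conteggio_elementi_categoria; infer_instance

-- ===== CLAIM (what is proved, stated in full; the proofs are below) =====
def Claim_equal_conteggio_elementi_categoria : Prop := ∀ (list : List String) (categoria : Int), Dom_conteggio_elementi_categoria list categoria → Spec_conteggio_elementi_categoria list categoria (conteggio_elementi_categoria list categoria)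

-- ===== LEMMAS AND PROOFS =====
-- newline positions of the list (proof-side characterisation of B's boundary table)
def pvNl : List String → List Int
  | [] => []
  | x :: rest => if x = "\n" then 0 :: (pvNl rest).map (· + 1) else (pvNl rest).map (· + 1)

theorem pv_filterMap_enumerate (l : List String) (s : Int) :
    (PySem.List.enumerate l s).filterMap (fun p => if p.2 == "\n" then some p.1 else none)
      = (pvNl l).map (· + s) := by
  induction l generalizing s with
  | nil => simp [PySem.List.enumerate_nil, pvNl]
  | cons x rest ih =>
    simp only [PySem.List.enumerate_cons, List.filterMap_cons, ih, pvNl]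
    by_cases hx : x = "\n" <;>
      simp [hx, List.map_map] <;>
      exact fun a _ => by ring

theorem pv_getD_cons_pos (x : Int) (xs : List Int) (i : Int) (h : 1 ≤ i) :
    PySem.List.pyGetD (x :: xs) i 0 = PySem.List.pyGetD xs (i - 1) 0 := by
  rw [PySem.List.pyGetD_of_nonneg _ _ (by omega : (0:Int) ≤ i),
      PySem.List.pyGetD_of_nonneg _ _ (by omega : (0:Int) ≤ i - 1)]
  have : i.toNat = (i - 1).toNat + 1 := by omega
  rw [this, List.getD_cons_succ]

theorem pv_getD_map_add (xs : List Int) (i : Int) (h0 : 0 ≤ i) (h : i < xs.length) :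
    PySem.List.pyGetD (xs.map (· + 1)) i 0 = PySem.List.pyGetD xs i 0 + 1 := by
  rw [PySem.List.pyGetD_eq_getElem _ _ h0 (by simpa using h),
      PySem.List.pyGetD_eq_getElem _ _ h0 (by simpa using h)]
  simp

theorem pv_getLast_map_add (xs : List Int) (h : xs ≠ []) :
    (xs.map (· + 1)).getLast (by simpa) = xs.getLast h + 1 := by
  rw [List.getLast_eq_getElem, List.getLast_eq_getElem]
  simp

-- closed form for A's loop: remaining target t = categoria - contatore, accumulated count ne
def pvG (l : List String) (t ne : Int) : Int :=
  let b := pvNl l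
  if 1 ≤ t ∧ t ≤ b.length then
    if t = 1 then ne + PySem.List.pyGetD b 0 0 + 1
    else PySem.List.pyGetD b (t - 1) 0 - PySem.List.pyGetD b (t - 2) 0
  else if b = [] then ne + l.length
  else (l.length : Int) - PySem.List.pyGetD b (-1) 0 - 1

-- step lemma, non-newline head: the whole table shifts by one position
theorem pvG_cons_not_nl (x : String) (rest : List String) (hx : ¬ x = "\n") (t ne : Int) :
    pvG (x :: rest) t ne = pvG rest t (ne + 1) := by
  unfold pvG
  simp only [pvNl, if_neg hx, List.length_map, List.length_cons, List.map_eq_nil_iff]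
  by_cases hr : 1 ≤ t ∧ t ≤ (pvNl rest).length
  · rw [if_pos hr, if_pos hr]
    by_cases h1 : t = 1
    · rw [if_pos h1, if_pos h1]
      rw [pv_getD_map_add _ 0 (by omega) (by omega)]
      ring
    · rw [if_neg h1, if_neg h1]
      rw [pv_getD_map_add _ (t-1) (by omega) (by omega),
          pv_getD_map_add _ (t-2) (by omega) (by omega)]
      ring
  · rw [if_neg hr, if_neg hr]
    by_cases hb : pvNl rest = []
    · simp [hb]; ring
    · rw [if_neg hb, if_neg hb]
      rw [PySem.List.pyGetD_neg_one _ _ (by simpa using hb),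
          PySem.List.pyGetD_neg_one _ _ hb,
          pv_getLast_map_add _ hb]
      push_cast
      ring

-- step lemma, newline head, target not hit: reset, one boundary consumed
theorem pvG_cons_nl (rest : List String) (t ne : Int) (h1 : ¬ t = 1) :
    pvG ("\n" :: rest) t ne = pvG rest (t - 1) 0 := by
  have hcons : pvNl ("\n" :: rest) = 0 :: (pvNl rest).map (· + 1) := by simp [pvNl]
  unfold pvG
  rw [hcons]
  have hlen : ((0 :: (pvNl rest).map (· + 1)).length : Int) = (pvNl rest).length + 1 := by
    simp
  by_cases hr : 1 ≤ t - 1 ∧ t - 1 ≤ (pvNl rest).length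
  · rw [if_pos (by rw [hlen] at *; omega), if_pos hr, if_neg h1]
    by_cases h2 : t = 2
    · subst h2
      rw [if_pos (by norm_num)]
      norm_num
      rw [pv_getD_cons_pos _ _ _ (by omega)]
      norm_num
      rw [pv_getD_map_add _ 0 (by omega) (by omega)]
    · rw [if_neg (by omega)]
      rw [pv_getD_cons_pos _ _ _ (by omega), pv_getD_cons_pos _ _ _ (by omega),
          pv_getD_map_add _ (t-1-1) (by omega) (by omega),
          pv_getD_map_add _ (t-2-1) (by omega) (by omega)]
      have e1 : t - 1 - 1 = t - 2 := by ring
      have e2 : t - 2 - 1 = t - 3 := by ring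
      rw [e1, e2]
      ring
  · rw [if_neg (by rw [hlen] at *; omega), if_neg hr]
    rw [if_neg (by simp), PySem.List.pyGetD_neg_one _ _ (by simp)]
    by_cases hb : pvNl rest = []
    · rw [if_pos hb, hb]
      simp
    · rw [if_neg hb, PySem.List.pyGetD_neg_one _ _ hb]
      rw [List.getLast_cons (by simpa using hb), pv_getLast_map_add _ hb]
      push_cast [List.length_cons]
      ring

-- step lemma, newline head, target hit
theorem pvG_cons_nl_hit (rest : List String) (ne : Int) :
    pvG ("\n" :: rest) 1 ne = ne + 1 := by
  have hcons : pvNl ("\n" :: rest) = 0 :: (pvNl rest).map (· + 1) := by simp [pvNl]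
  unfold pvG
  rw [hcons]
  rw [if_pos (by constructor <;> simp), if_pos rfl, PySem.List.pyGetD_zero_cons]
  ring

theorem pvLoopA_eq_pvG (cat : Int) (l : List String) : ∀ (c ne : Int),
    pvLoopA cat l c ne = pvG l (cat - c) ne := by
  induction l with
  | nil => intro c ne; simp [pvLoopA, pvG, pvNl]; intro h1 h2; omega
  | cons x rest ih =>
    intro c ne
    by_cases hx : x = "\n"
    · subst hx
      by_cases hhit : c + 1 = cat
      · have ht : cat - c = 1 := by omega
        rw [ht, pvG_cons_nl_hit]
        simp [pvLoopA, hhit]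
      · have ht : ¬ cat - c = 1 := by omega
        rw [pvG_cons_nl rest _ ne ht]
        have : cat - c - 1 = cat - (c + 1) := by ring
        rw [this, ← ih (c + 1) 0]
        simp [pvLoopA, hhit]
    · rw [pvG_cons_not_nl x rest hx, ← ih c (ne + 1)]
      simp [pvLoopA, hx]

theorem pv_alt_eq_pvG (l : List String) (cat : Int) :
    conteggio_elementi_categoria_alt l cat = pvG l cat 0 := by
  unfold conteggio_elementi_categoria_alt pvG
  rw [pv_filterMap_enumerate l 0]
  have hmap : (pvNl l).map (· + 0) = pvNl l := by simp
  rw [hmap]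
  simp only [PySem.List.len_eq, List.length_cons]
  by_cases hr : 1 ≤ cat ∧ cat ≤ (pvNl l).length
  · rw [if_pos (by push_cast; omega), if_pos hr]
    by_cases h1 : cat = 1
    · subst h1
      rw [if_pos rfl]
      rw [pv_getD_cons_pos _ _ _ (by omega)]
      norm_num [PySem.List.pyGetD_zero_cons]
    · rw [if_neg h1]
      rw [pv_getD_cons_pos _ _ _ (by omega), pv_getD_cons_pos _ _ _ (by omega)]
      have e1 : cat - 1 - 1 = cat - 2 := by ring
      rw [e1]
  · rw [if_neg (by push_cast; omega), if_neg hr]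
    rw [PySem.List.pyGetD_neg_one _ _ (by simp)]
    by_cases hb : pvNl l = []
    · rw [if_pos hb, hb]
      simp
    · rw [if_neg hb, PySem.List.pyGetD_neg_one _ _ hb,
          List.getLast_cons (by simpa using hb)]

-- ===== VERDICT (by name: the statement is the Claim_ definition above) =====
theorem conteggio_elementi_categoria_spec : Claim_equal_conteggio_elementi_categoria := by
  intro l cat _
  unfold Spec_conteggio_elementi_categoria
  rw [pv_alt_eq_pvG]
  simpa [conteggio_elementi_categoria] using pvLoopA_eq_pvG cat l 0 0
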